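-- pv_equiv track=rewrite | github.com/Mehran23/crypto-bot-mean-reversion | Equity Curve.py | adjust_balance_for_transactions
-- ===== SOURCE A (Python) =====
-- def adjust_balance_for_transactions(dates, balances, transactions):
--     adjusted_balances = balances.copy()
--     # First, create a list of all transactions for each date
--     date_transactions = {date: 0 for date in dates}
--     for date, amount in transactions.items():
--         if date in dates:
--             date_transactions[date] += amount
--
--     # Then apply the transactions to all subsequent balances
--     cumulative_adjustment = 0
--     for i, date in enumerate(dates):
--         if date_transactions[date] != 0:
--             # For withdrawals (negative amounts), we ADD the absolute value
--             # For deposits (positive amounts), we SUBTRACT the amount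
--             cumulative_adjustment -= date_transactions[date]  # Negative becomes positive, positive becomes negative
--         adjusted_balances[i] += cumulative_adjustment  # Add the adjustment
--
--     return adjusted_balances
-- ===== SOURCE B (Python) =====
-- def adjust_balance_for_transactions(dates, balances, transactions):
--     # Range-update formulation: a transaction on day i affects every balance
--     # from day i onward, so subtract its amount directly from that whole suffix.
--     adjusted = balances.copy()
--     n = len(dates)
--     for i, d in enumerate(dates):
--         amt = transactions.get(d, 0)
--         if amt:
--             for k in range(i, n):
--                 adjusted[k] -= amt
--     return adjusted
-- ===== Notes on version B (the rewrite author's own statement) =====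
-- stated objective: alternative
-- what changed: Replaces A's dict pre-index (with its per-transaction linear 'date in dates' membership scan) plus fused cumulative-accumulator loop by a range-update algorithm: no per-date delta dict and no running sum are built; each date's transaction amount is subtracted in place from the entire suffix of balances starting at that date (skipping dates with no transaction).
import Mathlib
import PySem

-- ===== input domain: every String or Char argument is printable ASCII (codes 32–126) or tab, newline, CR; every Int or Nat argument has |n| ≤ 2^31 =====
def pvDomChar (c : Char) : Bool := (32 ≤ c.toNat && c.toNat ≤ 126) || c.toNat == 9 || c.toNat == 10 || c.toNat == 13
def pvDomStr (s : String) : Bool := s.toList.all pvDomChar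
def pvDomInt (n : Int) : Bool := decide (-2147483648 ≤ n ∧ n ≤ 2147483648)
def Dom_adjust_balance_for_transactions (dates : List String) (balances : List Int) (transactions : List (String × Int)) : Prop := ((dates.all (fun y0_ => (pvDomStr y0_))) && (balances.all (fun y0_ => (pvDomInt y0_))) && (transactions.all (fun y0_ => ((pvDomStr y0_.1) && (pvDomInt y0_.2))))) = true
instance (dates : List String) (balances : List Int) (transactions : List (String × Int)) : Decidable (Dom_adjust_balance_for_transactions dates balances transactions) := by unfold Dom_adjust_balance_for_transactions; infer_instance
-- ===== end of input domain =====

-- B replaces A's dict pre-index + cumulative-accumulator loop with a range-update algorithm: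
-- each date's transaction amount is subtracted in place from the whole suffix of balances
-- starting at that date — no delta dict and no running sum exist in B (objective: alternative).

-- ===== PORT A =====
def adjust_balance_for_transactions (dates : List String) (balances : List Int) (transactions : List (String × Int)) : List Int :=
  -- adjusted_balances = balances.copy(); date_transactions = {date: 0 for date in dates}
  let dt0 : PySem.Dict String Int := dates.foldl (fun d date => d.insert date 0) PySem.Dict.empty
  -- for date, amount in transactions.items(): if date in dates: date_transactions[date] += amount
  let dt : PySem.Dict String Int :=
    transactions.foldl (fun d p => if p.1 ∈ dates then d.modify p.1 0 (· + p.2) else d) dt0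
  -- cumulative_adjustment = 0; for i, date in enumerate(dates): …
  let st :=
    (PySem.List.enumerate dates).foldl
      (fun (st : Int × List Int) p =>
        let x := dt.getD p.2 0
        let cum := if x ≠ 0 then st.1 - x else st.1
        (cum, st.2.set p.1.toNat (st.2.getD p.1.toNat 0 + cum)))
      (0, balances)
  st.2

-- ===== PORT B =====
-- loop body of B: amt = transactions.get(d, 0); if amt: for k in range(i, n): adjusted[k] -= amt
def pvBstep (dict : PySem.Dict String Int) (n : Int) (adjusted : List Int) (p : Int × String) : List Int :=
  let amt := dict.getD p.2 0
  if amt ≠ 0 then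
    (PySem.List.pyRange p.1 n 1).foldl
      (fun a k => a.set k.toNat (a.getD k.toNat 0 - amt)) adjusted
  else adjusted

def adjust_balance_for_transactions_alt (dates : List String) (balances : List Int) (transactions : List (String × Int)) : List Int :=
  -- adjusted = balances.copy(); n = len(dates); for i, d in enumerate(dates): pvBstep …
  (PySem.List.enumerate dates).foldl
    (pvBstep (PySem.Dict.mk transactions) (dates.length : Int)) balances

-- ===== PRECONDITION & SPEC =====
-- Pre_ excludes (1) inputs with more dates than balances, on which A raises IndexError, and
-- (2) association lists with duplicate transaction keys, which cannot arise from a Python dict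
-- argument (a duplicate-key dict literal collapses before the call), where A's summing and B's
-- first-match lookup are both defensible readings of the ambiguous representation.
def Pre_adjust_balance_for_transactions (dates : List String) (balances : List Int) (transactions : List (String × Int)) : Prop :=
  dates.length ≤ balances.length ∧ (transactions.map Prod.fst).Nodup
instance (dates : List String) (balances : List Int) (transactions : List (String × Int)) : Decidable (Pre_adjust_balance_for_transactions dates balances transactions) := by unfold Pre_adjust_balance_for_transactions; infer_instance

def pvWitness_adjust_balance_for_transactions : List String × List Int × (List (String × Int)) :=
  (["a", "b"], [100, 90, 80], [("a", 5), ("c", -2)])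

def Spec_adjust_balance_for_transactions (dates : List String) (balances : List Int) (transactions : List (String × Int)) (out : List Int) : Prop := out = adjust_balance_for_transactions_alt dates balances transactions
instance (dates : List String) (balances : List Int) (transactions : List (String × Int)) (out : List Int) : Decidable (Spec_adjust_balance_for_transactions dates balances transactions out) := by unfold Spec_adjust_balance_for_transactions; infer_instance

-- ===== CLAIM (what is proved, stated in full; the proofs are below) =====
def Claim_equal_adjust_balance_for_transactions : Prop := ∀ (dates : List String) (balances : List Int) (transactions : List (String × Int)), Dom_adjust_balance_for_transactions dates balances transactions → Pre_adjust_balance_for_transactions dates balances transactions → Spec_adjust_balance_for_transactions dates balances transactions (adjust_balance_for_transactions dates balances transactions)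

-- ===== LEMMAS AND PROOFS =====

-- functional description of A's loop: walk the dates, updating the cumulative adjustment
def pvGo (v : String → Int) : Int → List String → List Int → List Int
  | _, [], bs => bs
  | _, _ :: _, [] => []
  | c, d :: ds, b :: bs => (b + (c - v d)) :: pvGo v (c - v d) ds bs

-- functional description of B's loop: subtract v d from the whole remaining suffix, recurse
def pvGo2 (v : String → Int) : List String → List Int → List Int
  | [], _ => []
  | _ :: _, [] => []
  | d :: ds, b :: bs => (b - v d) :: pvGo2 v ds (bs.map (· - v d))

lemma pvGo_congr (v w : String → Int) (ds : List String) (h : ∀ d ∈ ds, v d = w d) :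
    ∀ c bs, pvGo v c ds bs = pvGo w c ds bs := by
  induction ds with
  | nil => intro c bs; rfl
  | cons d ds ih =>
    intro c bs
    cases bs with
    | nil => rfl
    | cons b bs =>
      have hd : v d = w d := h d (by simp)
      simp only [pvGo, hd]
      exact congrArg _ (ih (fun x hx => h x (by simp [hx])) _ _)

-- pvGo leaves the tail beyond the dates untouched
lemma pvGo_append_tail (v : String → Int) (ds : List String) :
    ∀ (c : Int) (bs t : List Int), ds.length = bs.length →
      pvGo v c ds (bs ++ t) = pvGo v c ds bs ++ t := by
  induction ds with
  | nil => intro c bs t h; cases bs with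
    | nil => rfl
    | cons b bs => simp at h
  | cons d ds ih =>
    intro c bs t h
    cases bs with
    | nil => simp at h
    | cons b bs =>
      simp only [List.cons_append, pvGo]
      exact congrArg _ (ih _ _ _ (by simpa using h))

-- the push-down recursion computes A's accumulator recursion
lemma pvGo2_eq (v : String → Int) (ds : List String) :
    ∀ (bs : List Int) (c : Int), bs.length = ds.length →
      pvGo2 v ds (bs.map (· + c)) = pvGo v c ds bs := by
  induction ds with
  | nil => intro bs c h; cases bs with
    | nil => rfl
    | cons b bs => simp at h
  | cons d ds ih =>
    intro bs c h
    cases bs with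
    | nil => simp at h
    | cons b bs =>
      simp only [List.map_cons, pvGo2, pvGo]
      have h1 : b + c - v d = b + (c - v d) := by ring
      have h2 : (bs.map (· + c)).map (· - v d) = bs.map (· + (c - v d)) := by
        rw [List.map_map]; apply List.map_congr_left; intro x _; simp; ring
      rw [h1, h2, ih _ _ (by simpa using h)]

-- base dict: every date initialised to 0
lemma pvDt0_getD (k : String) :
    ∀ (ds : List String) (e : PySem.Dict String Int), e.getD k 0 = 0 →
      (ds.foldl (fun d date => d.insert date 0) e).getD k 0 = 0 := by
  intro ds
  induction ds with
  | nil => intro e he; simpa using he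
  | cons d ds ih =>
    intro e he
    refine ih _ ?_
    rw [PySem.Dict.getD_insert]
    split <;> simp [he]

-- the transactions fold adds up all amounts whose date passes the membership test
lemma pvFold_getD (dates : List String) (k : String) (ts : List (String × Int)) :
    ∀ (d0 : PySem.Dict String Int),
      (ts.foldl (fun d p => if p.1 ∈ dates then d.modify p.1 0 (· + p.2) else d) d0).getD k 0
        = d0.getD k 0 + ((ts.filter (fun p => p.1 == k && decide (p.1 ∈ dates))).map Prod.snd).sum := by
  induction ts with
  | nil => intro d0; simp
  | cons p ts ih =>
    intro d0
    simp only [List.foldl_cons, List.filter_cons]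
    by_cases hm : p.1 ∈ dates
    · rw [if_pos hm, ih]
      by_cases hk : p.1 = k
      · subst hk
        simp [PySem.Dict.getD_modify_self, hm]
        ring
      · have : (p.1 == k && decide (p.1 ∈ dates)) = false := by simp [hk]
        rw [this]
        simp only [Bool.false_eq_true, if_false]
        rw [PySem.Dict.getD_modify]
        rw [if_neg (fun h => hk h.symm)]
    · rw [if_neg hm, ih]
      have : (p.1 == k && decide (p.1 ∈ dates)) = false := by simp [hm]
      rw [this]
      simp

-- with unique keys, that sum is exactly the dict lookup (for a key that is in dates)
lemma pvSum_eq_lookup (dates : List String) (k : String) (hk : k ∈ dates) :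
    ∀ ts : List (String × Int), (ts.map Prod.fst).Nodup →
      ((ts.filter (fun p => p.1 == k && decide (p.1 ∈ dates))).map Prod.snd).sum
        = (PySem.Dict.mk ts).getD k 0 := by
  intro ts
  induction ts with
  | nil => intro _; simp [PySem.Dict.getD_eq_get?_getD, PySem.Dict.get?]
  | cons p ts ih =>
    intro hnd
    obtain ⟨k1, v1⟩ := p
    have hnd' : (ts.map Prod.fst).Nodup := (List.nodup_cons.mp (by simpa using hnd)).2
    have hnotin : k1 ∉ ts.map Prod.fst := (List.nodup_cons.mp (by simpa using hnd)).1
    rw [List.filter_cons]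
    by_cases hpk : k1 = k
    · subst hpk
      have hfil : ts.filter (fun q => q.1 == k1 && decide (q.1 ∈ dates)) = [] := by
        apply List.filter_eq_nil_iff.mpr
        intro q hq
        have : q.1 ∈ ts.map Prod.fst := List.mem_map.mpr ⟨q, hq, rfl⟩
        simp only [Bool.and_eq_true, beq_iff_eq, not_and]
        intro h _
        exact hnotin (h ▸ this)
      simp [hk, hfil, PySem.Dict.getD_eq_get?_getD, PySem.Dict.get?_mk_cons]
    · have : ((k1, v1).1 == k && decide ((k1, v1).1 ∈ dates)) = false := by simp [hpk]
      rw [this]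
      simp only [Bool.false_eq_true, if_false]
      rw [ih hnd']
      simp [PySem.Dict.getD_eq_get?_getD, PySem.Dict.get?_mk_cons, hpk]

-- A's fused loop computes pvGo
lemma pvAloop (dt : PySem.Dict String Int) :
    ∀ (ds : List String) (pre suf : List Int) (c : Int), ds.length ≤ suf.length →
      ((PySem.List.enumerate ds (pre.length : Int)).foldl
        (fun (st : Int × List Int) p =>
          let x := dt.getD p.2 0
          let cum := if x ≠ 0 then st.1 - x else st.1
          (cum, st.2.set p.1.toNat (st.2.getD p.1.toNat 0 + cum)))
        (c, pre ++ suf)).2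
      = pre ++ pvGo (fun d => dt.getD d 0) c ds suf := by
  intro ds
  induction ds with
  | nil => intro pre suf c _; simp [PySem.List.enumerate_nil, pvGo]
  | cons d ds ih =>
    intro pre suf c hlen
    cases suf with
    | nil => simp at hlen
    | cons b suf =>
      rw [PySem.List.enumerate_cons, List.foldl_cons]
      have hcum : (if dt.getD d 0 ≠ 0 then c - dt.getD d 0 else c) = c - dt.getD d 0 := by
        split_ifs with h
        · rfl
        · omega
      have htn : ((pre.length : Int)).toNat = pre.length := by simp
      have hget : (pre ++ b :: suf).getD pre.length 0 = b := by
        simp [List.getD]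
      have hset : (pre ++ b :: suf).set pre.length (b + (c - dt.getD d 0))
          = (pre ++ [b + (c - dt.getD d 0)]) ++ suf := by
        rw [List.set_append_right _ _ (le_refl pre.length)]
        simp
      simp only [htn, hget, hcum, hset]
      have hlen' : ((pre ++ [b + (c - dt.getD d 0)]).length : Int) = (pre.length : Int) + 1 := by
        simp
      rw [← hlen']
      rw [ih (pre ++ [b + (c - dt.getD d 0)]) suf (c - dt.getD d 0) (by simpa using hlen)]
      simp [pvGo]

-- B's inner range loop subtracts amt from exactly the suffix region
lemma pvRangeSub (amt : Int) :
    ∀ (suf pre tail : List Int),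
      ((PySem.List.pyRange (pre.length : Int) ((pre.length + suf.length : Nat) : Int) 1).foldl
        (fun a k => a.set k.toNat (a.getD k.toNat 0 - amt)) (pre ++ (suf ++ tail)))
      = pre ++ (suf.map (· - amt) ++ tail) := by
  intro suf
  induction suf with
  | nil =>
    intro pre tail
    have h0 : ((pre.length + ([] : List Int).length : Nat) : Int) = (pre.length : Int) := by simp
    rw [h0, PySem.List.pyRange_one]
    simp
  | cons b suf ih =>
    intro pre tail
    have hlt : (pre.length : Int) < ((pre.length + (b :: suf).length : Nat) : Int) := by
      simp
    rw [PySem.List.pyRange_one_cons hlt, List.foldl_cons]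
    have htn : ((pre.length : Int)).toNat = pre.length := by simp
    have hget : (pre ++ (b :: suf ++ tail)).getD pre.length 0 = b := by
      simp [List.getD]
    have hset : (pre ++ (b :: suf ++ tail)).set pre.length (b - amt)
        = (pre ++ [b - amt]) ++ (suf ++ tail) := by
      rw [List.set_append_right _ _ (le_refl pre.length)]
      simp
    simp only [htn, hget, hset]
    have hlen' : ((pre ++ [b - amt]).length : Int) = (pre.length : Int) + 1 := by simp
    have hend : ((pre.length + (b :: suf).length : Nat) : Int)
        = (((pre ++ [b - amt]).length + suf.length : Nat) : Int) := by simp; omega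
    rw [hend, ← hlen', ih (pre ++ [b - amt]) tail]
    simp

-- B's outer loop computes pvGo2
lemma pvBloop (dict : PySem.Dict String Int) :
    ∀ (ds : List String) (pre suf tail : List Int), suf.length = ds.length →
      ((PySem.List.enumerate ds (pre.length : Int)).foldl
        (pvBstep dict ((pre.length + suf.length : Nat) : Int)) (pre ++ (suf ++ tail)))
      = pre ++ (pvGo2 (fun d => dict.getD d 0) ds suf ++ tail) := by
  intro ds
  induction ds with
  | nil =>
    intro pre suf tail h
    cases suf with
    | nil => simp [PySem.List.enumerate_nil, pvGo2]
    | cons b bs => simp at h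
  | cons d ds ih =>
    intro pre suf tail h
    cases suf with
    | nil => simp at h
    | cons b bs =>
      rw [PySem.List.enumerate_cons, List.foldl_cons]
      have hlen1 : ((pre ++ [b - dict.getD d 0]).length : Int) = (pre.length : Int) + 1 := by simp
      by_cases hamt : dict.getD d 0 = 0
      · -- amt = 0: no write; pvGo2's subtraction of 0 is the identity
        have hstep : pvBstep dict ((pre.length + (b :: bs).length : Nat) : Int)
            (pre ++ (b :: bs ++ tail)) ((pre.length : Int), d) = pre ++ (b :: bs ++ tail) := by
          simp [pvBstep, hamt]
        rw [hstep]
        have hre : pre ++ (b :: bs ++ tail) = (pre ++ [b]) ++ (bs ++ tail) := by simp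
        have hend : ((pre.length + (b :: bs).length : Nat) : Int)
            = (((pre ++ [b]).length + bs.length : Nat) : Int) := by simp; omega
        have hlen1' : ((pre ++ [b]).length : Int) = (pre.length : Int) + 1 := by simp
        rw [hre, hend, ← hlen1', ih (pre ++ [b]) bs tail (by simpa using h)]
        have hmap : bs.map (· - dict.getD d 0) = bs := by
          simp [hamt]
        rw [← hmap]; simp [pvGo2, hamt]
      · -- amt ≠ 0: the range loop rewrites the whole suffix
        have hstep : pvBstep dict ((pre.length + (b :: bs).length : Nat) : Int)
            (pre ++ (b :: bs ++ tail)) ((pre.length : Int), d)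
            = pre ++ ((b :: bs).map (· - dict.getD d 0) ++ tail) := by
          simp only [pvBstep, if_pos hamt]
          exact pvRangeSub (dict.getD d 0) (b :: bs) pre tail
        rw [hstep]
        have hre : pre ++ ((b :: bs).map (· - dict.getD d 0) ++ tail)
            = (pre ++ [b - dict.getD d 0]) ++ (bs.map (· - dict.getD d 0) ++ tail) := by simp
        have hend : ((pre.length + (b :: bs).length : Nat) : Int)
            = (((pre ++ [b - dict.getD d 0]).length + (bs.map (· - dict.getD d 0)).length : Nat) : Int) := by
          simp; omega
        rw [hre, hend, ← hlen1,
          ih (pre ++ [b - dict.getD d 0]) (bs.map (· - dict.getD d 0)) tail (by simpa using h)]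
        simp [pvGo2]

-- ===== VERDICT (by name: the statement is the Claim_ definition above) =====
theorem adjust_balance_for_transactions_spec : Claim_equal_adjust_balance_for_transactions := by
  intro dates balances transactions _ hpre
  obtain ⟨hlen, hnd⟩ := hpre
  unfold Spec_adjust_balance_for_transactions
  simp only [adjust_balance_for_transactions, adjust_balance_for_transactions_alt]
  -- A side: the fused loop is pvGo over the dict A built
  have hA := pvAloop
    (transactions.foldl (fun d p => if p.1 ∈ dates then d.modify p.1 0 (· + p.2) else d)
      (dates.foldl (fun d date => d.insert date 0) PySem.Dict.empty))
    dates [] balances 0 (by simpa using hlen)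
  simp only [List.length_nil, Nat.cast_zero, List.nil_append] at hA
  rw [hA]
  -- B side: split balances into the dated region and the untouched tail
  have htake : (balances.take dates.length).length = dates.length := by
    simpa using hlen
  have hB := pvBloop (PySem.Dict.mk transactions) dates []
    (balances.take dates.length) (balances.drop dates.length) htake
  simp only [List.length_nil, Nat.cast_zero, List.nil_append, Nat.zero_add,
    htake, List.take_append_drop] at hB
  rw [hB]
  -- identify A's dict lookups with B's direct lookups
  rw [pvGo_congr _ (fun d => (PySem.Dict.mk transactions).getD d 0) dates ?_ 0 balances]
  · have h1 : pvGo (fun d => (PySem.Dict.mk transactions).getD d 0) 0 dates balances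
        = pvGo (fun d => (PySem.Dict.mk transactions).getD d 0) 0 dates
            (balances.take dates.length) ++ balances.drop dates.length := by
      conv_lhs => rw [← List.take_append_drop dates.length balances]
      exact pvGo_append_tail _ dates 0 _ _ htake.symm
    have h2 : pvGo2 (fun d => (PySem.Dict.mk transactions).getD d 0) dates
          (balances.take dates.length)
        = pvGo (fun d => (PySem.Dict.mk transactions).getD d 0) 0 dates
            (balances.take dates.length) := by
      have h3 := pvGo2_eq (fun d => (PySem.Dict.mk transactions).getD d 0) dates
        (balances.take dates.length) 0 htake
      simpa using h3
    rw [h1, h2]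
  · intro d hd
    rw [pvFold_getD dates d transactions _,
      pvDt0_getD d dates PySem.Dict.empty (by simp),
      pvSum_eq_lookup dates d hd transactions hnd]
    simp
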